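-- pv_equiv track=rewrite | github.com/qfliuyang/aily | aily/chaos/tagger/engine.py | _limit_tags
-- ===== SOURCE A (Python) =====
-- def _limit_tags(tags: list[str], max_tags: int) -> list[str]:
--     """Limit number of tags by priority."""
--     if len(tags) <= max_tags:
--         return tags
--
--     # Priority order:
--     # 1. Domain tags (eda, ai, semiconductor)
--     # 2. Type tags (document, video, concept)
--     # 3. Entity tags (company names, technologies)
--     # 4. Generic tags
--
--     priority_keywords = {
--         # High priority domain tags
--         "eda", "ai", "semiconductor", "architecture", "design",
--         "mcp", "llm", "agent", "verification", "synthesis",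
--         # Type tags
--         "document", "video", "image", "presentation",
--         "concept", "methodology", "pattern", "framework",
--     }
--
--     # Sort by priority
--     def priority(tag: str) -> int:
--         if tag in priority_keywords:
--             return 0
--         if any(kw in tag for kw in priority_keywords):
--             return 1
--         return 2
--
--     sorted_tags = sorted(tags, key=priority)
--     return sorted_tags[:max_tags]
-- ===== SOURCE B (Python) =====
-- def _limit_tags(tags: list[str], max_tags: int) -> list[str]:
--     """Limit number of tags by priority (single-pass bucket distribution)."""
--     if len(tags) <= max_tags:
--         return tags
--
--     priority_keywords = {
--         "eda", "ai", "semiconductor", "architecture", "design",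
--         "mcp", "llm", "agent", "verification", "synthesis",
--         "document", "video", "image", "presentation",
--         "concept", "methodology", "pattern", "framework",
--     }
--
--     exact, partial, generic = [], [], []
--     for tag in tags:
--         if tag in priority_keywords:
--             exact.append(tag)
--         elif any(kw in tag for kw in priority_keywords):
--             partial.append(tag)
--         else:
--             generic.append(tag)
--
--     combined = exact + partial + generic
--     return combined[:max_tags]
-- ===== Notes on version B (the rewrite author's own statement) =====
-- stated objective: alternative
-- what changed: Replaces the comparison sort keyed by priority with a single-pass distribution into three priority buckets concatenated in order (relying on the sort's stability), keeping the early return and slice.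
import Mathlib
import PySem

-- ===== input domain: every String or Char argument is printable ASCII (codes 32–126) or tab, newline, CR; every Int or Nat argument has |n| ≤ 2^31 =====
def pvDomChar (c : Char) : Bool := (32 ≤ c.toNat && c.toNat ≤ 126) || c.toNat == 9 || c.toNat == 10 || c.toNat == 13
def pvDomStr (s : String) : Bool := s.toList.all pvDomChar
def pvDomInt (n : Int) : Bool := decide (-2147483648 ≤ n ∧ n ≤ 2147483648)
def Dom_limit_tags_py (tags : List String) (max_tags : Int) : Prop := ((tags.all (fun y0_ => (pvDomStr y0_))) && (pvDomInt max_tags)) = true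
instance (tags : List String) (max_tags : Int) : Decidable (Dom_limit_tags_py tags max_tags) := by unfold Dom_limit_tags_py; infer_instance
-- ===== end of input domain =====

-- B replaces the stable comparison sort keyed by priority with a single-pass three-bucket
-- distribution (alternative decomposition; same results by stability of the sort).


-- ===== PORT A =====
-- the priority_keywords set literal (shared table; both Pythons spell the same literal)
def pvPriorityKeywords : PySem.Set String := PySem.Set.ofList
  ["eda", "ai", "semiconductor", "architecture", "design",
   "mcp", "llm", "agent", "verification", "synthesis",
   "document", "video", "image", "presentation",
   "concept", "methodology", "pattern", "framework"]

-- A's nested helper `priority(tag)`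
def pvPriorityA (tag : String) : Int :=
  if PySem.Set.contains pvPriorityKeywords tag then 0
  else if pvPriorityKeywords.any (fun kw => PySem.Str.isIn kw tag) then 1
  else 2

def limit_tags_py (tags : List String) (max_tags : Int) : List String :=
  if (tags.length : Int) ≤ max_tags then tags
  else
    let sorted_tags := PySem.List.sorted tags pvPriorityA false
    PySem.List.slice sorted_tags none (some max_tags)

-- ===== PORT B =====
-- B: one pass appending each tag to the bucket of its priority, then concatenate and slice
def pvBucketStep (b : List String × List String × List String) (tag : String) :
    List String × List String × List String :=
  if PySem.Set.contains pvPriorityKeywords tag then (b.1 ++ [tag], b.2.1, b.2.2)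
  else if pvPriorityKeywords.any (fun kw => PySem.Str.isIn kw tag) then (b.1, b.2.1 ++ [tag], b.2.2)
  else (b.1, b.2.1, b.2.2 ++ [tag])

def limit_tags_py_alt (tags : List String) (max_tags : Int) : List String :=
  if (tags.length : Int) ≤ max_tags then tags
  else
    let bs := tags.foldl pvBucketStep ([], [], [])
    PySem.List.slice (bs.1 ++ bs.2.1 ++ bs.2.2) none (some max_tags)

-- ===== PRECONDITION & SPEC =====
def Spec_limit_tags_py (tags : List String) (max_tags : Int) (out : List String) : Prop := out = limit_tags_py_alt tags max_tags
instance (tags : List String) (max_tags : Int) (out : List String) : Decidable (Spec_limit_tags_py tags max_tags out) := by unfold Spec_limit_tags_py; infer_instance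

-- ===== CLAIM (what is proved, stated in full; the proofs are below) =====
def Claim_equal_limit_tags_py : Prop := ∀ (tags : List String) (max_tags : Int), Dom_limit_tags_py tags max_tags → Spec_limit_tags_py tags max_tags (limit_tags_py tags max_tags)

-- ===== LEMMAS AND PROOFS =====

-- the three bucket membership tests, as Bool predicates
def pvP0 (t : String) : Bool := PySem.Set.contains pvPriorityKeywords t
def pvPAny (t : String) : Bool := pvPriorityKeywords.any (fun kw => PySem.Str.isIn kw t)
def pvP1 (t : String) : Bool := !pvP0 t && pvPAny t
def pvP2 (t : String) : Bool := !pvP0 t && !pvPAny t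

lemma pvPriorityA_p0 {t : String} (h : pvP0 t = true) : pvPriorityA t = 0 := by
  have h' : PySem.Set.contains pvPriorityKeywords t = true := h
  simp only [pvPriorityA, h', reduceIte]

lemma pvPriorityA_p1 {t : String} (h0 : pvP0 t = false) (ha : pvPAny t = true) :
    pvPriorityA t = 1 := by
  have h0' : PySem.Set.contains pvPriorityKeywords t = false := h0
  have ha' : pvPriorityKeywords.any (fun kw => PySem.Str.isIn kw t) = true := ha
  simp only [pvPriorityA, h0', ha']; rfl

lemma pvPriorityA_p2 {t : String} (h0 : pvP0 t = false) (ha : pvPAny t = false) :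
    pvPriorityA t = 2 := by
  have h0' : PySem.Set.contains pvPriorityKeywords t = false := h0
  have ha' : pvPriorityKeywords.any (fun kw => PySem.Str.isIn kw t) = false := ha
  simp only [pvPriorityA, h0', ha']; rfl

lemma pvKey_of_mem_filter0 {t : String} {l : List String} (h : t ∈ l.filter pvP0) :
    pvPriorityA t = 0 := pvPriorityA_p0 (List.of_mem_filter h)

lemma pvKey_of_mem_filter1 {t : String} {l : List String} (h : t ∈ l.filter pvP1) :
    pvPriorityA t = 1 := by
  have := List.of_mem_filter h
  simp [pvP1] at this
  exact pvPriorityA_p1 this.1 this.2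

lemma pvKey_of_mem_filter2 {t : String} {l : List String} (h : t ∈ l.filter pvP2) :
    pvPriorityA t = 2 := by
  have := List.of_mem_filter h
  simp [pvP2] at this
  exact pvPriorityA_p2 this.1 this.2

-- insertBy passes a prefix on which `before` is false
lemma pv_insertBy_skip {α : Type} (before : α → α → Bool) (x : α) (A B : List α)
    (h : ∀ a ∈ A, before x a = false) :
    PySem.List.insertBy before x (A ++ B) = A ++ PySem.List.insertBy before x B := by
  induction A with
  | nil => simp
  | cons a t ih =>
    have ha := h a (by simp)
    simp [PySem.List.insertBy, ha]
    exact ih (fun y hy => h y (by simp [hy]))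

-- insertBy lands between a false prefix and a true suffix
lemma pv_insertBy_mid {α : Type} (before : α → α → Bool) (x : α) (A C : List α)
    (hA : ∀ a ∈ A, before x a = false) (hC : ∀ c ∈ C, before x c = true) :
    PySem.List.insertBy before x (A ++ C) = A ++ x :: C := by
  rw [pv_insertBy_skip before x A C hA]
  cases C with
  | nil => simp [PySem.List.insertBy]
  | cons c t => simp [PySem.List.insertBy, hC c (by simp)]

-- A's stable sort by priority is exactly the three filters concatenated
lemma pv_sorted_eq_buckets (tags : List String) :
    PySem.List.sorted tags pvPriorityA false =
      tags.filter pvP0 ++ tags.filter pvP1 ++ tags.filter pvP2 := by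
  rw [PySem.List.sorted_eq_foldl_insertBy]
  induction tags using List.reverseRecOn with
  | nil => simp
  | append_singleton xs x ih =>
    rw [List.foldl_append, List.foldl_cons, List.foldl_nil, ih]
    by_cases h0 : pvP0 x = true
    · have hk := pvPriorityA_p0 h0
      rw [show xs.filter pvP0 ++ xs.filter pvP1 ++ xs.filter pvP2
            = xs.filter pvP0 ++ (xs.filter pvP1 ++ xs.filter pvP2) by simp]
      rw [pv_insertBy_mid _ x (xs.filter pvP0) (xs.filter pvP1 ++ xs.filter pvP2)
          (fun a ha => by simp [hk, pvKey_of_mem_filter0 ha])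
          (fun c hc => by
            rcases List.mem_append.mp hc with h | h
            · simp [hk, pvKey_of_mem_filter1 h]
            · simp [hk, pvKey_of_mem_filter2 h])]
      have e1 : pvP1 x = false := by simp [pvP1, h0]
      have e2 : pvP2 x = false := by simp [pvP2, h0]
      simp [List.filter_append, h0, e1, e2]
    · have h0' : pvP0 x = false := by simpa using h0
      by_cases ha : pvPAny x = true
      · have hk := pvPriorityA_p1 h0' ha
        rw [show xs.filter pvP0 ++ xs.filter pvP1 ++ xs.filter pvP2
              = (xs.filter pvP0 ++ xs.filter pvP1) ++ xs.filter pvP2 by simp]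
        rw [pv_insertBy_mid _ x (xs.filter pvP0 ++ xs.filter pvP1) (xs.filter pvP2)
            (fun a hA => by
              rcases List.mem_append.mp hA with h | h
              · simp [hk, pvKey_of_mem_filter0 h]
              · simp [hk, pvKey_of_mem_filter1 h])
            (fun c hc => by simp [hk, pvKey_of_mem_filter2 hc])]
        have e1 : pvP1 x = true := by simp [pvP1, h0', ha]
        have e2 : pvP2 x = false := by simp [pvP2, ha]
        simp [List.filter_append, h0', e1, e2]
      · have ha' : pvPAny x = false := by simpa using ha
        have hk := pvPriorityA_p2 h0' ha'
        rw [PySem.List.insertBy_of_forall_not_before _ x _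
            (fun y hy => by
              rcases List.mem_append.mp hy with h | h
              · rcases List.mem_append.mp h with h' | h'
                · simp [hk, pvKey_of_mem_filter0 h']
                · simp [hk, pvKey_of_mem_filter1 h']
              · simp [hk, pvKey_of_mem_filter2 h])]
        have e1 : pvP1 x = false := by simp [pvP1, ha']
        have e2 : pvP2 x = true := by simp [pvP2, h0', ha']
        simp [List.filter_append, h0', e1, e2]

-- B's single pass computes the three filters
lemma pv_foldl_buckets (tags : List String) (a b c : List String) :
    tags.foldl pvBucketStep (a, b, c) =
      (a ++ tags.filter pvP0, b ++ tags.filter pvP1, c ++ tags.filter pvP2) := by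
  induction tags generalizing a b c with
  | nil => simp
  | cons t ts ih =>
    rw [List.foldl_cons]
    by_cases h0 : pvP0 t = true
    · have c0 : PySem.Set.contains pvPriorityKeywords t = true := h0
      have e1 : pvP1 t = false := by simp [pvP1, h0]
      have e2 : pvP2 t = false := by simp [pvP2, h0]
      rw [show pvBucketStep (a, b, c) t = (a ++ [t], b, c) by simp only [pvBucketStep, c0, reduceIte]]
      rw [ih]
      simp [h0, e1, e2]
    · have h0' : pvP0 t = false := by simpa using h0
      have c0 : PySem.Set.contains pvPriorityKeywords t = false := h0'
      by_cases ha : pvPAny t = true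
      · have ca : pvPriorityKeywords.any (fun kw => PySem.Str.isIn kw t) = true := ha
        have e1 : pvP1 t = true := by simp [pvP1, h0', ha]
        have e2 : pvP2 t = false := by simp [pvP2, ha]
        rw [show pvBucketStep (a, b, c) t = (a, b ++ [t], c) by simp only [pvBucketStep, c0, ca, reduceIte]; rfl]
        rw [ih]
        simp [h0', e1, e2]
      · have ha' : pvPAny t = false := by simpa using ha
        have ca : pvPriorityKeywords.any (fun kw => PySem.Str.isIn kw t) = false := ha'
        have e2 : pvP2 t = true := by simp [pvP2, h0', ha']
        have e1 : pvP1 t = false := by simp [pvP1, ha']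
        rw [show pvBucketStep (a, b, c) t = (a, b, c ++ [t]) by simp only [pvBucketStep, c0, ca]; rfl]
        rw [ih]
        simp [h0', e1, e2]

-- ===== VERDICT (by name: the statement is the Claim_ definition above) =====
theorem limit_tags_py_spec : Claim_equal_limit_tags_py := by
  intro tags max_tags _
  unfold Spec_limit_tags_py limit_tags_py limit_tags_py_alt
  by_cases h : (tags.length : Int) ≤ max_tags
  · simp [h]
  · simp only [h, if_false]
    rw [pv_sorted_eq_buckets, pv_foldl_buckets]
    simp
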